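-- pv_equiv track=rewrite | github.com/Reveret/DataMining | itemset_mining/apiori/apiori3.py | number_to_tupel
-- ===== SOURCE A (Python) =====
-- def number_to_tupel(result):
--     freq_tupel = []
--     for x in result:
--         freq_k = []
--         for i in range(len(x)):
--             tupel = set()
--             a = x[i]
--             j = 1
--             while a != 0:
--                 if a % 2 == 1:
--                     tupel |= {j}
--                 j += 1
--                 a = int(a / 2)
--             sorted(tupel)
--             freq_k.append(tupel)
--         freq_tupel.append(freq_k)
--     return freq_tupel
-- ===== SOURCE B (Python) =====
-- # B: precomputed 16-entry nibble table; each number's positions are assembled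
-- # recursively 4 bits at a time by shifting the table entries, instead of A's
-- # per-bit while-loop with repeated int(a/2).
-- _TABLE = [[p + 1 for p in range(4) if (k >> p) & 1] for k in range(16)]
--
--
-- def _positions(n, shift):
--     if n == 0:
--         return set()
--     return {p + shift for p in _TABLE[n & 15]} | _positions(n >> 4, shift + 4)
--
--
-- def number_to_tupel(result):
--     return [[_positions(abs(a), 0) for a in x] for x in result]
-- ===== Notes on version B (the rewrite author's own statement) =====
-- stated objective: alternative
-- what changed: B precomputes a 16-entry table mapping each nibble to its bit-position list and assembles each number's set recursively 4 bits at a time by shifting table entries, instead of A's per-bit while-loop of int(a/2) halving and singleton set unions; A's dead sorted() call is dropped.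
import Mathlib
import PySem

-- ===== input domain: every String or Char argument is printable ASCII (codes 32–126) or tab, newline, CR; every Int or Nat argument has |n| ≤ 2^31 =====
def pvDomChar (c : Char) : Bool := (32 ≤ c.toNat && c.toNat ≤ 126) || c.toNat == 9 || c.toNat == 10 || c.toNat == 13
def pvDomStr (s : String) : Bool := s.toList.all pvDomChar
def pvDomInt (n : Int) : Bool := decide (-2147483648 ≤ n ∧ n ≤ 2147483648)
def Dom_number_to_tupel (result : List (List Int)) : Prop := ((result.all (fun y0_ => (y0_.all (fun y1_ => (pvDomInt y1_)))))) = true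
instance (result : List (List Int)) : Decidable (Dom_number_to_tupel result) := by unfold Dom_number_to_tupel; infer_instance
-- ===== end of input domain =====

-- B replaces A's per-bit while-loop (set unions while halving with int(a/2)) by a
-- precomputed 16-entry nibble table: positions are assembled recursively 4 bits at a
-- time from shifted table entries; same asymptotic cost, a different data structure.
-- A's dead 'sorted(tupel)' (result discarded) is not ported.

-- ===== PORT A =====
-- termination helper for the while-loop: |int(a/2)| < |a| when a ≠ 0
theorem pvTdivTwoLt (a : Int) (h : a ≠ 0) : (a.tdiv 2).natAbs < a.natAbs := by
  rw [Int.natAbs_tdiv]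
  exact Nat.div_lt_self (Int.natAbs_pos.mpr h) (by decide)

-- while a != 0: if a % 2 == 1: tupel |= {j}; j += 1; a = int(a/2)
-- (PySem.Int.truncdiv is int(a/b), exact on Dom's |a| ≤ 2^31)
def pyLoopA (tupel : PySem.Set Int) (j : Int) (a : Int) : PySem.Set Int :=
  if h : a ≠ 0 then
    pyLoopA (if PySem.Int.mod a 2 = 1 then PySem.Set.add tupel j else tupel)
      (j + 1) (PySem.Int.truncdiv a 2)
  else tupel
termination_by a.natAbs
decreasing_by exact pvTdivTwoLt a h

def number_to_tupel (result : List (List Int)) : List (List (List Int)) :=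
  result.foldl (fun freq_tupel x =>
    freq_tupel ++ [x.foldl (fun freq_k a => freq_k ++ [pyLoopA PySem.Set.empty 1 a]) []]) []

-- ===== PORT B =====
-- _TABLE = [[p + 1 for p in range(4) if (k >> p) & 1] for k in range(16)]
def nibbleTable : List (List Int) :=
  (List.range 16).map (fun k =>
    ((List.range 4).filter (fun p => (k >>> p) &&& 1 == 1)).map (fun p => (p : Int) + 1))

-- if n == 0: return set(); return {p + shift for p in _TABLE[n & 15]} | _positions(n >> 4, shift + 4)
def positionsB (n : Nat) (shift : Int) : PySem.Set Int :=
  if n = 0 then PySem.Set.empty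
  else PySem.Set.union (PySem.Set.ofList ((nibbleTable.getD (n &&& 15) []).map (fun p => p + shift)))
         (positionsB (n >>> 4) (shift + 4))
termination_by n
decreasing_by simp [Nat.shiftRight_eq_div_pow]; exact Nat.div_lt_self (by omega) (by omega)

def number_to_tupel_alt (result : List (List Int)) : List (List (List Int)) :=
  result.map (fun x => x.map (fun a => positionsB a.natAbs 0))

-- ===== PRECONDITION & SPEC =====
def Spec_number_to_tupel (result : List (List Int)) (out : List (List (List Int))) : Prop := out = number_to_tupel_alt result
instance (result : List (List Int)) (out : List (List (List Int))) : Decidable (Spec_number_to_tupel result out) := by unfold Spec_number_to_tupel; infer_instance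

-- ===== CLAIM =====
def Claim_equal_number_to_tupel : Prop := ∀ (result : List (List Int)), Dom_number_to_tupel result → Spec_number_to_tupel result (number_to_tupel result)

-- ===== LEMMAS AND PROOFS =====

-- common reference list: the bit positions of n, offset by j, in ascending order
def posList (n : Nat) (j : Int) : List Int :=
  if n = 0 then [] else (if n % 2 = 1 then [j] else []) ++ posList (n / 2) (j + 1)
termination_by n
decreasing_by exact Nat.div_lt_self (by omega) (by omega)

theorem pvModTwo (a : Int) : (PySem.Int.mod a 2 = 1) ↔ a.natAbs % 2 = 1 := by
  rw [PySem.Int.mod_eq_emod_of_pos (by norm_num)]; omega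

theorem pyLoopA_eq (n : Nat) : ∀ (a : Int), a.natAbs = n → ∀ (j : Int) (s : PySem.Set Int),
    (∀ y ∈ s, y < j) → pyLoopA s j a = s ++ posList n j := by
  induction n using Nat.strong_induction_on with
  | _ n ih =>
    intro a ha j s hs
    rw [pyLoopA, posList]
    by_cases h0 : a = 0
    · subst h0
      simp only [Int.natAbs_zero] at ha
      subst ha
      simp
    · have hn0 : n ≠ 0 := by simp [← ha, h0]
      rw [dif_pos h0, if_neg hn0]
      have hd : PySem.Int.truncdiv a 2 = a.tdiv 2 := rfl
      have hhalf : (Int.tdiv a 2).natAbs = n / 2 := by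
        rw [Int.natAbs_tdiv, ← ha]; rfl
      have hrec := ih (n / 2) (Nat.div_lt_self (by omega) (by omega)) (a.tdiv 2) hhalf (j + 1)
      rw [hd]
      by_cases hodd : PySem.Int.mod a 2 = 1
      · have hmod : n % 2 = 1 := by rw [← ha]; exact (pvModTwo a).mp hodd
        have hj : j ∉ s := fun hmem => by have := hs j hmem; omega
        have hadd : PySem.Set.add s j = s ++ [j] := by
          simp [PySem.Set.add, hj]
        rw [if_pos hodd, hadd,
          hrec (s ++ [j]) (by
            intro y hy
            rcases List.mem_append.mp hy with hy | hy
            · have := hs y hy; omega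
            · simp at hy; omega)]
        simp [hmod, List.append_assoc]
      · have hmod : ¬ n % 2 = 1 := by rw [← ha]; exact fun h => hodd ((pvModTwo a).mpr h)
        rw [if_neg hodd, hrec s (by intro y hy; have := hs y hy; omega)]
        simp [hmod]

theorem posList_step (n : Nat) (j : Int) :
    posList n j = (if n % 2 = 1 then [j] else []) ++ posList (n / 2) (j + 1) := by
  by_cases h0 : n = 0
  · subst h0; rw [posList]; simp [posList]
  · rw [posList, if_neg h0]

theorem nibbleTable_eq : nibbleTable =
    [[],[1],[2],[1,2],[3],[1,3],[2,3],[1,2,3],[4],[1,4],[2,4],[1,2,4],[3,4],[1,3,4],[2,3,4],[1,2,3,4]] := by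
  decide

-- four steps of posList peel one nibble off via the table
theorem posList_nibble (n : Nat) (j : Int) :
    posList n j = ((nibbleTable.getD (n % 16) []).map (fun p => p + (j - 1))) ++
      posList (n / 16) (j + 4) := by
  rw [posList_step n j, posList_step (n / 2) (j + 1), posList_step (n / 2 / 2) (j + 1 + 1),
    posList_step (n / 2 / 2 / 2) (j + 1 + 1 + 1)]
  have e2 : n / 2 / 2 = n / 4 := by omega
  have e3 : n / 2 / 2 / 2 = n / 8 := by omega
  have e4 : n / 2 / 2 / 2 / 2 = n / 16 := by omega
  rw [e2, e3, e4] at *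
  have ej : j + 1 + 1 + 1 + 1 = j + 4 := by ring
  rw [ej]
  have h1 : n % 2 = n % 16 % 2 := by omega
  have h2 : n / 2 % 2 = n % 16 / 2 % 2 := by omega
  have h3 : n / 4 % 2 = n % 16 / 4 % 2 := by omega
  have h4 : n / 8 % 2 = n % 16 / 8 % 2 := by omega
  rw [h1, h2, h3, h4]
  have hr : n % 16 < 16 := by omega
  interval_cases h : n % 16 <;> simp [nibbleTable_eq] <;> omega

theorem posList_mem_ge (n : Nat) : ∀ (j : Int), ∀ y ∈ posList n j, j ≤ y := by
  induction n using Nat.strong_induction_on with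
  | _ n ih =>
    intro j y hy
    rw [posList] at hy
    by_cases h0 : n = 0
    · simp [h0] at hy
    · rw [if_neg h0] at hy
      rcases List.mem_append.mp hy with hy | hy
      · split at hy <;> simp_all
      · have := ih (n / 2) (Nat.div_lt_self (by omega) (by omega)) (j + 1) y hy
        omega

theorem posList_pairwise (n : Nat) : ∀ (j : Int), (posList n j).Pairwise (· < ·) := by
  induction n using Nat.strong_induction_on with
  | _ n ih =>
    intro j
    rw [posList]
    by_cases h0 : n = 0
    · simp [h0]
    · rw [if_neg h0]
      have hrec := ih (n / 2) (Nat.div_lt_self (by omega) (by omega)) (j + 1)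
      have hge := posList_mem_ge (n / 2) (j + 1)
      refine List.pairwise_append.mpr ⟨?_, hrec, ?_⟩
      · split <;> simp
      · intro x hx y hy
        have := hge y hy
        split at hx <;> simp_all

-- s | t for disjoint nodup parts is append
theorem set_union_disjoint (s t : PySem.Set Int) (ht : t.Nodup) (hd : ∀ y ∈ t, y ∉ s) :
    PySem.Set.union s t = s ++ t := by
  induction t generalizing s with
  | nil => simp [PySem.Set.union, PySem.Set.update]
  | cons y t ih =>
    have hy : y ∉ s := hd y (by simp)
    have hadd : PySem.Set.add s y = s ++ [y] := by simp [PySem.Set.add, hy]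
    have : PySem.Set.union s (y :: t) = PySem.Set.union (s ++ [y]) t := by
      simp [PySem.Set.union, PySem.Set.update, hadd]
    rw [this, ih (s ++ [y]) (List.Nodup.of_cons ht) ?_]
    · simp
    · intro z hz
      simp only [List.mem_append, List.mem_singleton]
      rintro (h | rfl)
      · exact hd z (by simp [hz]) h
      · exact (List.nodup_cons.mp ht).1 hz

theorem nibbleTable_mem_bounds : ∀ l ∈ nibbleTable, l.Pairwise (· < ·) ∧ ∀ p ∈ l, 1 ≤ p ∧ p ≤ 4 := by
  decide

theorem positionsB_eq (n : Nat) : ∀ (shift : Int), positionsB n shift = posList n (shift + 1) := by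
  induction n using Nat.strong_induction_on with
  | _ n ih =>
    intro shift
    rw [positionsB]
    by_cases h0 : n = 0
    · simp [h0, posList, PySem.Set.empty]
    · rw [if_neg h0]
      have hand : n &&& 15 = n % 16 := Nat.and_two_pow_sub_one_eq_mod n 4
      have hsh : n >>> 4 = n / 16 := by simp [Nat.shiftRight_eq_div_pow]
      have hlen : n % 16 < nibbleTable.length := by
        simp [nibbleTable]; omega
      have hmem : nibbleTable.getD (n % 16) [] ∈ nibbleTable := by
        rw [List.getD_eq_getElem _ _ hlen]; exact List.getElem_mem hlen
      obtain ⟨hpw, hbd⟩ := nibbleTable_mem_bounds _ hmem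
      have hnodup : ((nibbleTable.getD (n % 16) []).map (fun p => p + shift)).Nodup :=
        List.Nodup.map (fun a b h => by omega) (List.Pairwise.nodup hpw)
      rw [hand, hsh, PySem.Set.ofList_eq_self_of_nodup _ hnodup,
        ih (n / 16) (Nat.div_lt_self (by omega) (by omega)) (shift + 4),
        set_union_disjoint _ _ (List.Pairwise.nodup (posList_pairwise _ _)) ?_]
      · rw [posList_nibble n (shift + 1)]
        have e1 : shift + 1 - 1 = shift := by ring
        rw [e1]
        have e2 : shift + 4 + 1 = shift + 1 + 4 := by ring
        rw [e2]
      · intro y hy hmem2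
        have h5 := posList_mem_ge _ _ y hy
        obtain ⟨p, hp, rfl⟩ := List.mem_map.mp hmem2
        have := (hbd p hp).2
        omega

-- ===== VERDICT =====
theorem number_to_tupel_spec : Claim_equal_number_to_tupel := by
  intro result _
  unfold Spec_number_to_tupel number_to_tupel number_to_tupel_alt
  rw [PySem.List.foldl_append_singleton_eq_map]
  apply List.map_congr_left
  intro x _
  rw [PySem.List.foldl_append_singleton_eq_map]
  apply List.map_congr_left
  intro a _
  rw [pyLoopA_eq a.natAbs a rfl 1 PySem.Set.empty (by intro y hy; simp [PySem.Set.empty] at hy),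
    positionsB_eq a.natAbs 0]
  simp [PySem.Set.empty]
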